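-- pv_equiv track=rewrite | github.com/som2303/Coding-Test | 프로그래머스/unrated/155652. 둘만의 암호/둘만의 암호.py | solution
-- ===== SOURCE A (Python) =====
-- def solution(s, skip, index):
--     a_z = [chr(i) for i in range(97,123)]
--     for i in skip:
--         a_z.remove(i)
--     answer = ''
--     for i in s:
--         idx = (a_z.index(i)+index)%len(a_z)
--         answer+=a_z[idx]
--     return answer
-- ===== SOURCE B (Python) =====
-- def solution(s, skip, index):
--     # rank/unrank arithmetic over character codes: no alphabet list, no table.
--     ks = []
--     for c in skip:
--         o = ord(c)
--         if o < 97 or o > 122 or o in ks: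
--             raise ValueError("bad skip letter")
--         ks.append(o)
--     ks.sort()
--     n = 26 - len(ks)
--     out = []
--     for ch in s:
--         o = ord(ch)
--         if o < 97 or o > 122 or o in ks:
--             raise ValueError("character not in the pruned alphabet")
--         r = o - 97
--         for k in ks:
--             if k < o:
--                 r -= 1
--         p = (r + index) % n
--         q = p + 97
--         for k in ks:
--             if k <= q:
--                 q += 1
--         out.append(chr(q))
--     return ''.join(out)
-- ===== Notes on version B (the rewrite author's own statement) =====
-- stated objective: alternative
-- what changed: B never builds the pruned alphabet: it collects and validates the skip codes (raising ValueError where A's list.remove/list.index would), sorts them once, and per character computes the rank arithmetically (code minus 97 minus the number of smaller skip codes) and maps the shifted rank back to a code with an order-statistic unrank scan over the sorted skip codes, instead of A's per-character list.index scan over a 26-letter list.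
import Mathlib
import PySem

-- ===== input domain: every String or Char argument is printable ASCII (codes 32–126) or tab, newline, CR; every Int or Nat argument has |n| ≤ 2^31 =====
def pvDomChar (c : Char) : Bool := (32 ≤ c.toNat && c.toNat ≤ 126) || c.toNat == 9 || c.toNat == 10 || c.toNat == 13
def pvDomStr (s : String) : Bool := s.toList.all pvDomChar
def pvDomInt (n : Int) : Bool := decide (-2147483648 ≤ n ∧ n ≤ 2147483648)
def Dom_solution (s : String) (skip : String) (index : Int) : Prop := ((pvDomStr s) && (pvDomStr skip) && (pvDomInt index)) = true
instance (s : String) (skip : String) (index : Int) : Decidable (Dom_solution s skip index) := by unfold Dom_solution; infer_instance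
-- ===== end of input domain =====

set_option maxRecDepth 40000


-- B drops A's pruned-alphabet list entirely: it sorts the skip codes once and per character
-- computes the rank arithmetically and unranks the shifted rank by an order-statistic scan
-- over the sorted skip codes (alternative algorithm, similar cost).

-- ===== PORT A =====
-- a_z = [chr(i) for i in range(97,123)]
def azA : List Char := (PySem.List.pyRange 97 123 1).map (fun i => Char.ofNat i.toNat)

-- for i in skip: a_z.remove(i)   (none = ValueError)
def pruneA : List Char → List Char → Option (List Char)
  | l, [] => some l
  | l, c :: rest =>
      match PySem.List.remove? l c with
      | none => none
      | some l' => pruneA l' rest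

-- for i in s: idx = (a_z.index(i)+index)%len(a_z); answer += a_z[idx]   (none = ValueError)
def loopA (az : List Char) (index : Int) : List Char → List Char → Option (List Char)
  | [], acc => some acc
  | c :: rest, acc =>
      match PySem.List.index? az c with
      | none => none
      | some j =>
          match PySem.List.pyGet? az (PySem.Int.mod ((j : Int) + index) (az.length : Int)) with
          | none => none
          | some ch => loopA az index rest (acc ++ [ch])

def solution (s : String) (skip : String) (index : Int) : String :=
  match pruneA azA skip.toList with
  | none => ""                    -- unreachable under Pre_ (ValueError in Python)
  | some az =>
      match loopA az index s.toList [] with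
      | none => ""                -- unreachable under Pre_ (ValueError in Python)
      | some cs => String.mk cs

-- ===== PORT B =====
-- r = o - 97; for k in ks: if k < o: r -= 1
def rankLoop (ks : List Int) (o : Int) : Int :=
  ks.foldl (fun r k => if k < o then r - 1 else r) (o - 97)

-- q = p + 97; for k in ks: if k <= q: q += 1
def unrankLoop (ks : List Int) (q : Int) : Int :=
  ks.foldl (fun q k => if k ≤ q then q + 1 else q) q

-- ks = []; for c in skip: validate, append ord(c)   (none = ValueError)
def collectSkip : List Char → List Int → Option (List Int)
  | [], acc => some acc
  | c :: rest, acc =>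
      if (c.toNat : Int) < 97 || 122 < (c.toNat : Int) || acc.contains ((c.toNat : Int)) then none
      else collectSkip rest (acc ++ [((c.toNat : Int))])

-- for ch in s: validate, rank, shift, unrank, append chr(q)   (none = ValueError)
def loopB (ks : List Int) (n : Int) (index : Int) : List Char → List Char → Option (List Char)
  | [], acc => some acc
  | ch :: rest, acc =>
      if (ch.toNat : Int) < 97 || 122 < (ch.toNat : Int) || ks.contains ((ch.toNat : Int)) then none
      else
        let p := PySem.Int.mod (rankLoop ks ((ch.toNat : Int)) + index) n
        -- chr(q): the code is a valid ASCII code here, so Char.ofNat q.toNat is exact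
        loopB ks n index rest (acc ++ [Char.ofNat (unrankLoop ks (p + 97)).toNat])

def solution_alt (s : String) (skip : String) (index : Int) : String :=
  match collectSkip skip.toList [] with
  | none => ""                    -- ValueError in Python
  | some ks0 =>
      let ks := PySem.List.sorted ks0 (fun x => x) false
      let n : Int := 26 - (ks.length : Int)
      match loopB ks n index s.toList [] with
      | none => ""                -- ValueError in Python
      | some cs => String.mk cs

-- ===== PRECONDITION & SPEC =====
def azLower : List Char :=
  ['a','b','c','d','e','f','g','h','i','j','k','l','m','n','o','p','q','r','s','t','u','v','w','x','y','z']

-- Pre_ excludes exactly the inputs where A raises ValueError: a repeated or non-lowercase skip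
-- character (list.remove fails), or a character of s outside the pruned alphabet (list.index fails).
def Pre_solution (s : String) (skip : String) (index : Int) : Prop :=
  skip.toList.Nodup ∧
  skip.toList.all (fun c => azLower.contains c) = true ∧
  s.toList.all (fun c => azLower.contains c && !(skip.toList.contains c)) = true
instance (s : String) (skip : String) (index : Int) : Decidable (Pre_solution s skip index) := by
  unfold Pre_solution; infer_instance
def pvWitness_solution : String × String × Int := ("ac", "b", 1)

def Spec_solution (s : String) (skip : String) (index : Int) (out : String) : Prop := out = solution_alt s skip index
instance (s : String) (skip : String) (index : Int) (out : String) : Decidable (Spec_solution s skip index out) := by unfold Spec_solution; infer_instance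

-- ===== CLAIM (what is proved, stated in full; the proofs are below) =====
def Claim_equal_solution : Prop := ∀ (s : String) (skip : String) (index : Int), Dom_solution s skip index → Pre_solution s skip index → Spec_solution s skip index (solution s skip index)

-- ===== LEMMAS AND PROOFS =====

-- the sorted skip-code list B computes, named for the proofs
def ksB (skip : String) : List Int :=
  PySem.List.sorted (skip.toList.map (fun c => (c.toNat : Int))) (fun x => x) false


theorem char_toNat_inj (a b : Char) (h : a.toNat = b.toNat) : a = b := by
  apply Char.ext
  exact UInt32.toBitVec_inj.mp (BitVec.toNat_inj.mp h)

-- A-side: the remove loop is filtering under Pre_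
theorem index?_mem (az : List Char) (c : Char) (h : c ∈ az) :
    PySem.List.index? az c = some (az.idxOf c) := by
  rw [PySem.List.index?_eq_idxOf?]
  induction az with
  | nil => simp at h
  | cons a t ih =>
    by_cases hac : a = c
    · subst hac; simp [List.idxOf?_cons]
    · simp only [List.mem_cons] at h
      have hc : c ∈ t := h.resolve_left (fun e => hac e.symm)
      simp [List.idxOf?_cons, hac, ih hc, beq_iff_eq]

theorem pruneA_eq : ∀ (sk l : List Char), l.Nodup → sk.Nodup → (∀ c ∈ sk, c ∈ l) →
    pruneA l sk = some (l.filter (fun c => !sk.contains c))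
  | [], l, _, _, _ => by simp [pruneA]
  | c :: rest, l, hl, hsk, hsub => by
    have hc : c ∈ l := hsub c (by simp)
    have herase : PySem.List.remove? l c = some (l.erase c) :=
      PySem.List.remove?_eq_some_erase l c hc
    have hsk' := hsk
    simp only [List.nodup_cons] at hsk'
    have hsub' : ∀ d ∈ rest, d ∈ l.erase c := by
      intro d hd
      have hdc : d ≠ c := fun e => hsk'.1 (e ▸ hd)
      exact (List.mem_erase_of_ne hdc).mpr (hsub d (List.mem_cons_of_mem _ hd))
    have ih := pruneA_eq rest (l.erase c) (hl.erase c) hsk'.2 hsub'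
    rw [pruneA, herase]
    simp only [ih, Option.some.injEq]
    rw [List.Nodup.erase_eq_filter hl c, List.filter_filter]
    apply List.filter_congr
    intro x _
    by_cases hxc : x = c <;> simp [hxc]

-- A's character loop, as a map
theorem loopA_eq (az : List Char) (index : Int) :
    ∀ (cs acc : List Char), (∀ c ∈ cs, c ∈ az) →
    loopA az index cs acc =
      some (acc ++ cs.map (fun c =>
        az.getD (PySem.Int.mod ((az.idxOf c : Int) + index) (az.length : Int)).toNat ' ')) := by
  intro cs
  induction cs with
  | nil => intro acc _; simp [loopA]
  | cons c rest ih =>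
    intro acc hmem
    have hc : c ∈ az := hmem c (by simp)
    have hpos : (0 : Int) < (az.length : Int) := by
      have : az ≠ [] := by rintro rfl; simp at hc
      have : 0 < az.length := List.length_pos_iff.mpr this
      exact_mod_cast this
    have h0 : 0 ≤ PySem.Int.mod ((az.idxOf c : Int) + index) (az.length : Int) :=
      PySem.Int.mod_nonneg _ hpos
    have h1 : PySem.Int.mod ((az.idxOf c : Int) + index) (az.length : Int) < (az.length : Int) :=
      PySem.Int.mod_lt _ hpos
    have hlt : (PySem.Int.mod ((az.idxOf c : Int) + index) (az.length : Int)).toNat < az.length := by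
      omega
    have hget := PySem.List.pyGet?_eq_some_getElem (xs := az) h0 (by exact_mod_cast h1)
    rw [loopA]
    simp only [index?_mem az c hc, hget]
    rw [ih (acc ++ [_]) (fun d hd => hmem d (List.mem_cons_of_mem _ hd))]
    simp [List.getD_eq_getElem?_getD, List.getElem?_eq_getElem hlt]

-- strictly increasing list: index = number of smaller elements
theorem idxOf_sorted_strict : ∀ (l : List Char),
    l.Pairwise (fun a b => a.toNat < b.toNat) → ∀ c ∈ l,
    l.idxOf c = l.countP (fun y => decide (y.toNat < c.toNat)) := by
  intro l hl c hc
  induction l with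
  | nil => simp at hc
  | cons a t ih =>
    rw [List.pairwise_cons] at hl
    rcases List.mem_cons.mp hc with rfl | hct
    · have : t.countP (fun y => decide (y.toNat < c.toNat)) = 0 := by
        rw [List.countP_eq_zero]
        intro y hy
        have := hl.1 y hy
        simp; omega
      rw [List.countP_cons, this]
      simp [List.idxOf_cons_self]
    · have hac : a ≠ c := by
        intro h; subst h
        have := hl.1 a hct; omega
      have halt : a.toNat < c.toNat := hl.1 c hct
      rw [List.idxOf_cons_ne _ hac, List.countP_cons, ih hl.2 hct]
      simp [halt]

-- split a countP along a second predicate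
theorem countP_split (l : List Char) (p q : Char → Bool) :
    l.countP p = l.countP (fun y => p y && q y) + l.countP (fun y => p y && !q y) := by
  induction l with
  | nil => simp
  | cons a t ih =>
    simp only [List.countP_cons]
    cases hp : p a <;> cases hq : q a <;> simp [hp, hq] <;> omega

-- filter of azLower by membership in skip is a permutation of skip
theorem filter_mem_perm (skip : List Char) (h1 : skip.Nodup)
    (h2 : ∀ c ∈ skip, c ∈ azLower) :
    (azLower.filter (fun y => skip.contains y)).Perm skip := by
  rw [List.perm_ext_iff_of_nodup (List.Nodup.filter _ (by decide)) h1]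
  intro a
  simp only [List.mem_filter, List.contains_eq_mem, decide_eq_true_eq]
  exact ⟨fun h => h.2, fun h => ⟨h2 a h, h⟩⟩

-- rank fold = initial minus count of smaller skip codes
theorem rankLoop_eq (ks : List Int) (o : Int) :
    rankLoop ks o = o - 97 - (ks.countP (fun k => decide (k < o)) : Int) := by
  unfold rankLoop
  generalize o - 97 = init
  induction ks generalizing init with
  | nil => simp
  | cons k t ih =>
    simp only [List.foldl_cons, List.countP_cons]
    by_cases h : k < o
    · rw [ih]; simp [h]; omega
    · rw [ih]; simp [h]

-- Nat-level unrank fold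
def unrankN (ks : List Nat) (q : Nat) : Nat :=
  ks.foldl (fun q k => if k ≤ q then q + 1 else q) q

theorem unrankLoop_cast (ks : List Nat) (q : Nat) :
    unrankLoop (ks.map (fun (k : Nat) => (k : Int))) (q : Int) = (unrankN ks q : Int) := by
  unfold unrankLoop unrankN
  induction ks generalizing q with
  | nil => simp
  | cons k t ih =>
    rw [List.map_cons, List.foldl_cons, List.foldl_cons]
    by_cases h : k ≤ q
    · rw [if_pos (by exact_mod_cast h : ((k : Int) ≤ (q : Int))), if_pos h]
      have hc : ((q : Int) + 1) = ((q + 1 : Nat) : Int) := by push_cast; ring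
      rw [hc]
      exact ih (q + 1)
    · rw [if_neg (by exact_mod_cast h : ¬ ((k : Int) ≤ (q : Int))), if_neg h]
      exact ih q

theorem unrankN_all_gt (ks : List Nat) (q : Nat) (h : ∀ k ∈ ks, q < k) :
    unrankN ks q = q := by
  unfold unrankN
  induction ks with
  | nil => rfl
  | cons k t ih =>
    have hk := h k (by simp)
    simp only [List.foldl_cons, if_neg (by omega : ¬ k ≤ q)]
    exact ih (fun k hk' => h k (by simp [hk']))

-- unrank is the p-th element of the complement of ks in range' a n
theorem unrank_spec : ∀ (n a : Nat) (ks : List Nat), ks.Pairwise (· < ·) →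
    (∀ k ∈ ks, a ≤ k) → ∀ p,
    p < ((List.range' a n).filter (fun x => !ks.contains x)).length →
    unrankN ks (a + p) = ((List.range' a n).filter (fun x => !ks.contains x)).getD p 0 := by
  intro n
  induction n with
  | zero => intro a ks _ _ p hp; simp at hp
  | succ m ih =>
    intro a ks hsort hlb p hp
    by_cases ha : a ∈ ks
    · -- a is the least element of ks, so ks = a :: rest, and the filter drops a
      obtain ⟨k, rest, rfl⟩ : ∃ k rest, ks = k :: rest := by
        cases ks with
        | nil => simp at ha
        | cons k rest => exact ⟨k, rest, rfl⟩
      rw [List.pairwise_cons] at hsort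
      have hka : k = a := by
        rcases List.mem_cons.mp ha with h | h
        · exact h.symm
        · have := hsort.1 a h
          have := hlb k (by simp)
          omega
      subst hka
      have hdrop : (List.range' k (m+1)).filter (fun x => !(k :: rest).contains x)
          = (List.range' (k+1) m).filter (fun x => !rest.contains x) := by
        rw [List.range'_succ, List.filter_cons]
        have h1 : (!(k :: rest).contains k) = false := by simp
        rw [h1]
        simp only [Bool.false_eq_true, if_false]
        apply List.filter_congr
        intro x hx
        have hx1 : k + 1 ≤ x := (List.mem_range'_1.mp hx).1
        simp only [List.contains_cons]
        have hxk : (x == k) = false := by simp; omega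
        rw [hxk, Bool.false_or]
      rw [hdrop] at hp ⊢
      have step : unrankN (k :: rest) (k + p) = unrankN rest (k + 1 + p) := by
        unfold unrankN
        rw [List.foldl_cons, if_pos (by omega : k ≤ k + p)]
        congr 1
        omega
      rw [step]
      exact ih (k+1) rest hsort.2 (fun x hx => by have := hsort.1 x hx; omega) p hp
    · -- a survives the filter
      have hkeep : (List.range' a (m+1)).filter (fun x => !ks.contains x)
          = a :: (List.range' (a+1) m).filter (fun x => !ks.contains x) := by
        rw [List.range'_succ, List.filter_cons]
        have h1 : (!ks.contains a) = true := by simpa using ha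
        rw [h1]
        simp
      rw [hkeep] at hp ⊢
      have hgt : ∀ k ∈ ks, a < k := by
        intro k hk
        have h1 := hlb k hk
        have h2 : k ≠ a := fun e => ha (e ▸ hk)
        omega
      cases p with
      | zero =>
        simp only [List.getD_cons_zero, Nat.add_zero]
        exact unrankN_all_gt ks a hgt
      | succ p' =>
        simp only [List.getD_cons_succ]
        have := ih (a+1) ks hsort (fun k hk => hgt k hk) p' (by simpa using hp)
        calc unrankN ks (a + (p' + 1)) = unrankN ks (a + 1 + p') := by ring_nf
          _ = _ := this

-- ===== main per-character analysis =====

theorem skipCodes_subrange (skip : List Char) (h2 : ∀ c ∈ skip, c ∈ azLower) :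
    ∀ k ∈ skip.map Char.toNat, 97 ≤ k ∧ k < 123 := by
  have hall : (azLower.all (fun c => decide (97 ≤ c.toNat) && decide (c.toNat < 123))) = true := by
    decide
  intro k hk
  obtain ⟨c, hc, rfl⟩ := List.mem_map.mp hk
  have := List.all_eq_true.mp hall c (h2 c hc)
  simp at this
  omega

theorem countP_codes (l : List Char) (x : Nat) :
    (l.map Char.toNat).countP (fun k => decide (k < x)) = l.countP (fun c => decide (c.toNat < x)) := by
  simp [List.countP_map]; rfl

theorem countP_cast (l : List Nat) (x : Nat) :
    ((l.map (fun (k : Nat) => (k : Int))).countP (fun k => decide (k < (x : Int))))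
      = l.countP (fun k => decide (k < x)) := by
  simp [List.countP_map]
  apply List.countP_congr
  intro k _
  simp

theorem contains_map_toNat (skip : List Char) (c : Char) :
    (skip.map Char.toNat).contains c.toNat = skip.contains c := by
  induction skip with
  | nil => rfl
  | cons a t ih =>
    simp only [List.map_cons, List.contains_cons, ih]
    congr 1
    by_cases h : c = a
    · subst h; simp
    · have hne : c.toNat ≠ a.toNat := fun e => h (char_toNat_inj c a e)
      simp [h, hne]

theorem map_filter_comm (l : List Char) (p : Nat → Bool) :
    (l.filter (fun c => p c.toNat)).map Char.toNat = (l.map Char.toNat).filter p := by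
  induction l with
  | nil => rfl
  | cons a t ih => by_cases h : p a.toNat <;> simp [h, ih]

theorem azLower_map : azLower.map Char.toNat = List.range' 97 26 := by decide
theorem azLower_nodup : azLower.Nodup := by decide
theorem azLower_pairwise : azLower.Pairwise (fun a b => a.toNat < b.toNat) := by decide

theorem azLower_bounds (c : Char) (hc : c ∈ azLower) : 97 ≤ c.toNat ∧ c.toNat < 123 := by
  have hall : (azLower.all (fun c => decide (97 ≤ c.toNat) && decide (c.toNat < 123))) = true := by
    decide
  have := List.all_eq_true.mp hall c hc
  simp at this
  omega

theorem azLower_count (c : Char) (hc : c ∈ azLower) :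
    97 + azLower.countP (fun y => decide (y.toNat < c.toNat)) = c.toNat := by
  have hall : (azLower.all (fun c =>
      decide (97 + azLower.countP (fun y => decide (y.toNat < c.toNat)) = c.toNat))) = true := by
    decide
  have := List.all_eq_true.mp hall c hc
  simpa using this

theorem azCodes_eq (skip : List Char) :
    (azLower.filter (fun c => !skip.contains c)).map Char.toNat
      = (List.range' 97 26).filter (fun x => !(skip.map Char.toNat).contains x) := by
  have h1 : azLower.filter (fun c => !skip.contains c)
      = azLower.filter (fun c => !(skip.map Char.toNat).contains c.toNat) := by
    apply List.filter_congr
    intro x _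
    rw [contains_map_toNat]
  rw [h1, map_filter_comm azLower (fun x => !(List.map Char.toNat skip).contains x), azLower_map]

-- the sorted skip codes, named as a strictly increasing list
def sortedSkipN (skip : List Char) : List Nat :=
  (List.range' 97 26).filter (fun x => (skip.map Char.toNat).contains x)

theorem sortedSkipN_sorted (skip : List Char) : (sortedSkipN skip).Pairwise (· < ·) :=
  List.Pairwise.sublist List.filter_sublist (List.pairwise_lt_range' ..)

theorem toNat_injective : Function.Injective Char.toNat := fun a b h => char_toNat_inj a b h

theorem sortedSkipN_perm (skip : List Char) (h1 : skip.Nodup) (h2 : ∀ c ∈ skip, c ∈ azLower) :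
    (sortedSkipN skip).Perm (skip.map Char.toNat) := by
  have hsub := skipCodes_subrange skip h2
  unfold sortedSkipN
  rw [List.perm_ext_iff_of_nodup
      (List.Nodup.filter _ (List.nodup_range' ..)) (h1.map toNat_injective)]
  intro x
  simp only [List.mem_filter, List.contains_eq_mem, decide_eq_true_eq]
  constructor
  · exact fun h => h.2
  · intro h
    refine ⟨?_, h⟩
    have := hsub x h
    rw [List.mem_range'_1]
    omega

theorem ksB_eq (skip : String) (h1 : skip.toList.Nodup) (h2 : ∀ c ∈ skip.toList, c ∈ azLower) :
    ksB skip = (sortedSkipN skip.toList).map (fun (k : Nat) => (k : Int)) := by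
  unfold ksB
  apply PySem.List.sorted_eq_of_perm_of_pairwise_lt
  · have hmm : skip.toList.map (fun c => (c.toNat : Int))
        = (skip.toList.map Char.toNat).map (fun (k : Nat) => (k : Int)) := by
      rw [List.map_map]; rfl
    rw [hmm]
    exact (sortedSkipN_perm skip.toList h1 h2).map _
  · rw [List.pairwise_map]
    apply List.Pairwise.imp _ (sortedSkipN_sorted skip.toList)
    intro a b h
    exact_mod_cast h

theorem az_len (skip : List Char) (h1 : skip.Nodup) (h2 : ∀ c ∈ skip, c ∈ azLower) :
    (azLower.filter (fun c => !skip.contains c)).length + skip.length = 26 := by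
  have hsplit : (azLower.filter (fun c => skip.contains c)).length
      + (azLower.filter (fun c => !skip.contains c)).length = azLower.length :=
    (List.length_eq_length_filter_add _).symm
  have hperm := (filter_mem_perm skip h1 h2).length_eq
  have h26 : azLower.length = 26 := by decide
  omega

theorem rank_nat (skip : List Char) (h1 : skip.Nodup) (h2 : ∀ c ∈ skip, c ∈ azLower)
    (c : Char) (hc : c ∈ azLower.filter (fun c => !skip.contains c)) :
    (azLower.filter (fun c => !skip.contains c)).idxOf c
      + (skip.map Char.toNat).countP (fun k => decide (k < c.toNat)) + 97 = c.toNat := by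
  have hpw : (azLower.filter (fun c => !skip.contains c)).Pairwise (fun a b => a.toNat < b.toNat) :=
    List.Pairwise.sublist List.filter_sublist azLower_pairwise
  rw [idxOf_sorted_strict _ hpw c hc]
  rw [List.countP_filter]
  have hsplit := countP_split azLower (fun y => decide (y.toNat < c.toNat)) (fun y => skip.contains y)
  have hmapcount : azLower.countP (fun y => decide (y.toNat < c.toNat) && skip.contains y)
      = (skip.map Char.toNat).countP (fun k => decide (k < c.toNat)) := by
    rw [← List.countP_filter]
    rw [List.Perm.countP_congr (filter_mem_perm skip h1 h2) (fun x _ => rfl)]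
    rw [countP_codes]
  have hbase := azLower_count c (List.mem_filter.mp hc).1
  omega

theorem getD_map_toNat (l : List Char) (p : Nat) (h : p < l.length) :
    (l.map Char.toNat).getD p 0 = (l.getD p ' ').toNat := by
  rw [List.getD_eq_getElem _ _ (by simpa using h), List.getD_eq_getElem _ _ h, List.getElem_map]

theorem unrank_az (skip : String) (h1 : skip.toList.Nodup)
    (h2 : ∀ c ∈ skip.toList, c ∈ azLower) (p : Nat)
    (hp : p < (azLower.filter (fun c => !skip.toList.contains c)).length) :
    Char.ofNat ((unrankLoop (ksB skip) ((p : Int) + 97)).toNat)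
      = (azLower.filter (fun c => !skip.toList.contains c)).getD p ' ' := by
  rw [ksB_eq skip h1 h2]
  have hcast : ((p : Int) + 97) = ((97 + p : Nat) : Int) := by push_cast; ring
  rw [hcast, unrankLoop_cast, Int.toNat_natCast]
  have hfilter_eq : (List.range' 97 26).filter (fun x => !(sortedSkipN skip.toList).contains x)
      = (List.range' 97 26).filter (fun x => !(skip.toList.map Char.toNat).contains x) := by
    apply List.filter_congr
    intro x _
    congr 1
    rw [List.contains_eq_mem, List.contains_eq_mem]
    exact decide_eq_decide.mpr (sortedSkipN_perm skip.toList h1 h2).mem_iff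
  have hlen : p < ((List.range' 97 26).filter
      (fun x => !(sortedSkipN skip.toList).contains x)).length := by
    rw [hfilter_eq, ← azCodes_eq]
    simpa using hp
  have hlb : ∀ k ∈ sortedSkipN skip.toList, 97 ≤ k := by
    intro k hk
    have := (List.mem_range'_1.mp (List.mem_filter.mp hk).1).1
    omega
  rw [unrank_spec 26 97 (sortedSkipN skip.toList) (sortedSkipN_sorted skip.toList) hlb p hlen]
  rw [hfilter_eq, ← azCodes_eq, getD_map_toNat _ _ hp, Char.ofNat_toNat]

theorem collectSkip_eq : ∀ (sk : List Char) (acc : List Int), sk.Nodup →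
    (∀ c ∈ sk, c ∈ azLower) → (∀ c ∈ sk, ((c.toNat : Int)) ∉ acc) →
    collectSkip sk acc = some (acc ++ sk.map (fun c => (c.toNat : Int))) := by
  intro sk
  induction sk with
  | nil => intro acc _ _ _; simp [collectSkip]
  | cons c rest ih =>
    intro acc hnd hlow hdis
    rw [List.nodup_cons] at hnd
    have hb := azLower_bounds c (hlow c (by simp))
    have h97 : ¬ ((c.toNat : Int) < 97) := by omega
    have h122 : ¬ (122 < (c.toNat : Int)) := by omega
    have hacc : acc.contains ((c.toNat : Int)) = false := by
      rw [List.contains_eq_mem, decide_eq_false_iff_not]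
      exact hdis c (by simp)
    have hcond : (decide ((c.toNat : Int) < 97) || decide (122 < (c.toNat : Int))
        || acc.contains ((c.toNat : Int))) = false := by
      rw [hacc]
      simp [h97, h122]
    rw [collectSkip, hcond]
    simp only [Bool.false_eq_true, if_false]
    have hdis' : ∀ d ∈ rest, ((d.toNat : Int)) ∉ acc ++ [((c.toNat : Int))] := by
      intro d hd hmem
      rcases List.mem_append.mp hmem with h | h
      · exact hdis d (List.mem_cons_of_mem _ hd) h
      · have : (d.toNat : Int) = (c.toNat : Int) := by simpa using h
        have : d = c := char_toNat_inj d c (by exact_mod_cast this)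
        exact hnd.1 (this ▸ hd)
    rw [ih (acc ++ [((c.toNat : Int))]) hnd.2 (fun d hd => hlow d (List.mem_cons_of_mem _ hd)) hdis']
    simp

theorem loopB_eq (ks : List Int) (n index : Int) :
    ∀ (cs acc : List Char),
    (∀ c ∈ cs, (decide ((c.toNat : Int) < 97) || decide (122 < (c.toNat : Int))
        || ks.contains ((c.toNat : Int))) = false) →
    loopB ks n index cs acc = some (acc ++ cs.map (fun c =>
      Char.ofNat (unrankLoop ks (PySem.Int.mod (rankLoop ks ((c.toNat : Int)) + index) n + 97)).toNat)) := by
  intro cs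
  induction cs with
  | nil => intro acc _; simp [loopB]
  | cons c rest ih =>
    intro acc h
    rw [loopB, h c (by simp)]
    simp only [Bool.false_eq_true, if_false]
    rw [ih (acc ++ [_]) (fun d hd => h d (List.mem_cons_of_mem _ hd))]
    simp

-- ===== VERDICT (by name: the statement is the Claim_ definition above) =====
theorem solution_spec : Claim_equal_solution := by
  intro s skip index _ hpre
  obtain ⟨h1, h2a, h3a⟩ := hpre
  have h2 : ∀ c ∈ skip.toList, c ∈ azLower := by
    intro c hcm
    have := (List.all_eq_true.mp h2a) c hcm
    simpa [List.contains_eq_mem] using this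
  show solution s skip index = solution_alt s skip index
  have hazA : azA = azLower := by decide
  set az := azLower.filter (fun c => !(skip.toList.contains c)) with haz
  have hprune : pruneA azA skip.toList = some az :=
    hazA ▸ pruneA_eq skip.toList azLower azLower_nodup h1 h2
  have hsmem : ∀ c ∈ s.toList, c ∈ az := by
    intro c hcm
    have := (List.all_eq_true.mp h3a) c hcm
    simp only [Bool.and_eq_true, Bool.not_eq_true'] at this
    rw [haz, List.mem_filter]
    exact ⟨by simpa [List.contains_eq_mem] using this.1, by rw [this.2]; rfl⟩
  have hloop := loopA_eq az index s.toList [] hsmem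
  -- B's skip pass returns the code list
  have hcollect : collectSkip skip.toList [] = some (skip.toList.map (fun c => (c.toNat : Int))) := by
    simpa using collectSkip_eq skip.toList [] h1 h2 (by simp)
  -- guard condition for the characters of s
  have hks_cont : ∀ c ∈ az, ((ksB skip).contains ((c.toNat : Int))) = false := by
    intro c hcaz'
    rw [List.contains_eq_mem, decide_eq_false_iff_not]
    unfold ksB
    rw [PySem.List.mem_sorted]
    intro hmem
    obtain ⟨d, hd, he⟩ := List.mem_map.mp hmem
    have hdc : d = c := char_toNat_inj d c (by exact_mod_cast he)
    subst hdc
    have hnc := (List.mem_filter.mp (haz ▸ hcaz')).2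
    simp only [Bool.not_eq_true', List.contains_eq_mem, decide_eq_false_iff_not] at hnc
    exact hnc hd
  have hguard : ∀ c ∈ s.toList, (decide ((c.toNat : Int) < 97) || decide (122 < (c.toNat : Int))
      || (ksB skip).contains ((c.toNat : Int))) = false := by
    intro c hcm
    have hcaz' := hsmem c hcm
    have hb := azLower_bounds c (List.mem_filter.mp (haz ▸ hcaz')).1
    have h97 : ¬ ((c.toNat : Int) < 97) := by omega
    have h122 : ¬ (122 < (c.toNat : Int)) := by omega
    rw [hks_cont c hcaz']
    simp [h97, h122]
  have hloopB := loopB_eq (ksB skip) (26 - ((ksB skip).length : Int)) index s.toList [] hguard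
  have hksB : PySem.List.sorted (skip.toList.map (fun c => (c.toNat : Int))) (fun x => x) false
      = ksB skip := rfl
  simp only [solution, solution_alt, hprune, hloop, hcollect, List.nil_append, hksB, hloopB]
  congr 1
  apply List.map_congr_left
  intro c hcm
  have hcaz : c ∈ az := hsmem c hcm
  -- lengths: 26 - len(ks) = len(az)
  have hkslen : (ksB skip).length = skip.toList.length := by
    unfold ksB
    rw [PySem.List.length_sorted, List.length_map]
  have hlen26 := az_len skip.toList h1 h2
  rw [← haz] at hlen26
  have hlen : (26 : Int) - ((ksB skip).length : Int) = (az.length : Int) := by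
    rw [hkslen]
    push_cast
    omega
  -- rank: rankLoop computes the index of c in az
  have hrank : rankLoop (ksB skip) ((c.toNat : Int)) = ((az.idxOf c : Nat) : Int) := by
    rw [rankLoop_eq, ksB_eq skip h1 h2, countP_cast,
        List.Perm.countP_congr (sortedSkipN_perm skip.toList h1 h2) (fun x _ => rfl)]
    have hnat := rank_nat skip.toList h1 h2 c (haz ▸ hcaz)
    rw [← haz] at hnat
    omega
  rw [hrank, hlen]
  set p := PySem.Int.mod ((az.idxOf c : Int) + index) (az.length : Int) with hpdef
  have hpos : (0 : Int) < (az.length : Int) := by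
    have hne : az ≠ [] := by intro h; rw [h] at hcaz; simp at hcaz
    have := List.length_pos_iff.mpr hne
    exact_mod_cast this
  have hp0 : 0 ≤ p := PySem.Int.mod_nonneg _ hpos
  have hp1 : p < (az.length : Int) := PySem.Int.mod_lt _ hpos
  have hpn : ((p.toNat : Nat) : Int) = p := Int.toNat_of_nonneg hp0
  have hplt : p.toNat < az.length := by omega
  rw [← hpn, haz]
  exact (unrank_az skip h1 h2 p.toNat (haz ▸ hplt)).symm
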